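-- pv_equiv track=rewrite | github.com/itsnowkim/algorithm-study | code/danbom/week2/파괴되지_않은_건물.py | solution
-- ===== SOURCE A (Python) =====
-- def solution(board, skill):
--     answer = 0
--     prefixSum = [[0] * (len(board[0]) + 1) for _ in range(len(board) + 1)]
--
--     for type, r1, c1, r2, c2, degree in skill:
--         prefixSum[r1][c1] += degree if type == 2 else -degree
--         prefixSum[r1][c2 + 1] += -degree if type == 2 else degree
--         prefixSum[r2 + 1][c1] += -degree if type == 2 else degree
--         prefixSum[r2 + 1][c2 + 1] += degree if type == 2 else -degree
--
--     for i in range(len(prefixSum) - 1):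
--         for j in range(len(prefixSum[0]) - 1):
--             prefixSum[i][j + 1] += prefixSum[i][j]
--
--     for j in range(len(prefixSum[0]) - 1):
--         for i in range(len(prefixSum) - 1):
--             prefixSum[i + 1][j] += prefixSum[i][j]
--
--     for i in range(len(board)):
--         for j in range(len(board[i])):
--             board[i][j] += prefixSum[i][j]
--             if board[i][j] > 0: answer += 1
--
--     return answer
-- ===== SOURCE B (Python) =====
-- def solution(board, skill):
--     for t, r1, c1, r2, c2, degree in skill:
--         delta = degree if t == 2 else -degree
--         for r in range(r1, r2 + 1):
--             row = board[r]
--             for c in range(c1, c2 + 1):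
--                 row[c] += delta
--     return sum(1 for row in board for v in row if v > 0)
-- ===== Notes on version B (the rewrite author's own statement) =====
-- stated objective: simpler
-- what changed: Replaces the 2D difference-array with row/column prefix-sum passes by a direct brute-force update (add delta to every cell of each skill rectangle) followed by one counting pass.
-- outside the precondition, e.g. on solution([[-1], [1], [-1]], [[2, 2, 0, 0, 0, 5]]): A returns 0, B returns 1; on solution([[1]], [[2, -1, 0, -1, 0, 1]]): A returns 0, B returns 1; on solution([[1, 1], [1]], [[2, 0, 0, 1, 1, 5]]): A returns 3, B raises IndexError
import Mathlib
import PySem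

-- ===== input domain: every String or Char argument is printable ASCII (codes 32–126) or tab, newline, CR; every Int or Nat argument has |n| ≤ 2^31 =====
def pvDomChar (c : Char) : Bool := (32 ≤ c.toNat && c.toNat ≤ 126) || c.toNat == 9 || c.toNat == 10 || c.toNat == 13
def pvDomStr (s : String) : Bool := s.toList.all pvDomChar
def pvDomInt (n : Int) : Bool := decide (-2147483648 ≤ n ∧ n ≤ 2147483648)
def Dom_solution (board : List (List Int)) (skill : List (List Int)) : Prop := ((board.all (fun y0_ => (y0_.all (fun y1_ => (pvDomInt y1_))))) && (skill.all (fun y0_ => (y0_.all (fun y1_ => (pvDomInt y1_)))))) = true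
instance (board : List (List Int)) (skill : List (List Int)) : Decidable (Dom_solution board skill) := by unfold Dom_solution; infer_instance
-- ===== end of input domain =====

-- B replaces A's 2D difference-array / prefix-sum scheme by the direct brute-force
-- rectangle update plus one counting pass (objective: simpler). Both Pythons mutate
-- `board` in place in the same way; the equivalence proved here is about the return value.

-- ===== PORT A =====
-- m[i][j] += v  (Python list semantics via PySem)
def pvAdd2 (m : List (List Int)) (i j v : Int) : List (List Int) :=
  let row := PySem.List.pyGetD m i []
  PySem.List.pySetD m i (PySem.List.pySetD row j (PySem.List.pyGetD row j 0 + v))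

-- body of the skill loop: the four corner updates of the difference array
def pvSkillPassA (ps : List (List Int)) (s : List Int) : List (List Int) :=
  match s with
  | [t, r1, c1, r2, c2, degree] =>
    let ps := pvAdd2 ps r1 c1 (if t = 2 then degree else -degree)
    let ps := pvAdd2 ps r1 (c2+1) (if t = 2 then -degree else degree)
    let ps := pvAdd2 ps (r2+1) c1 (if t = 2 then -degree else degree)
    pvAdd2 ps (r2+1) (c2+1) (if t = 2 then degree else -degree)
  | _ => ps

-- inner body of the row-prefix loop: prefixSum[i][j+1] += prefixSum[i][j]
def pvRowIn (i : Int) : List (List Int) → Int → List (List Int) :=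
  fun ps j => pvAdd2 ps i (j+1) (PySem.List.pyGetD (PySem.List.pyGetD ps i []) j 0)

-- inner body of the column-prefix loop: prefixSum[i+1][j] += prefixSum[i][j]
def pvColIn (j : Int) : List (List Int) → Int → List (List Int) :=
  fun ps i => pvAdd2 ps (i+1) j (PySem.List.pyGetD (PySem.List.pyGetD ps i []) j 0)

-- inner body of the final loop: board[i][j] += prefixSum[i][j]; if board[i][j] > 0: answer += 1
def pvCntIn (m : List (List Int)) (i : Int) : (List (List Int) × Int) → Int → (List (List Int) × Int) :=
  fun st j =>
    let b := pvAdd2 st.1 i j (PySem.List.pyGetD (PySem.List.pyGetD m i []) j 0)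
    (b, if 0 < PySem.List.pyGetD (PySem.List.pyGetD b i []) j 0 then st.2 + 1 else st.2)

def solution (board : List (List Int)) (skill : List (List Int)) : Int :=
  let ps0 := List.replicate (board.length + 1)
      (List.replicate ((PySem.List.pyGetD board 0 []).length + 1) (0:Int))
  let ps1 := skill.foldl pvSkillPassA ps0
  let ps2 := (PySem.List.pyRange 0 ((ps1.length : Int) - 1) 1).foldl (fun ps i =>
      (PySem.List.pyRange 0 (((PySem.List.pyGetD ps 0 []).length : Int) - 1) 1).foldl (pvRowIn i) ps) ps1
  let ps3 := (PySem.List.pyRange 0 (((PySem.List.pyGetD ps2 0 []).length : Int) - 1) 1).foldl (fun ps j =>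
      (PySem.List.pyRange 0 ((ps.length : Int) - 1) 1).foldl (pvColIn j) ps) ps2
  ((PySem.List.pyRange 0 (board.length : Int) 1).foldl (fun (st : List (List Int) × Int) i =>
      (PySem.List.pyRange 0 ((PySem.List.pyGetD st.1 i []).length : Int) 1).foldl (pvCntIn ps3 i) st)
    (board, (0:Int))).2

-- ===== PORT B =====
-- row[c] += delta
def pvCellIn (delta : Int) : List Int → Int → List Int :=
  fun row c => PySem.List.pySetD row c (PySem.List.pyGetD row c 0 + delta)

-- body of the row loop: add delta to board[r][c1..c2]
def pvRowUpd (c1 c2 delta : Int) : List (List Int) → Int → List (List Int) :=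
  fun b r =>
    let row := PySem.List.pyGetD b r []
    PySem.List.pySetD b r ((PySem.List.pyRange c1 (c2+1) 1).foldl (pvCellIn delta) row)

-- body of the skill loop: brute-force rectangle update
def pvRect (b : List (List Int)) (s : List Int) : List (List Int) :=
  match s with
  | [t, r1, c1, r2, c2, degree] =>
    let delta := if t = 2 then degree else -degree
    (PySem.List.pyRange r1 (r2+1) 1).foldl (pvRowUpd c1 c2 delta) b
  | _ => b

def solution_alt (board : List (List Int)) (skill : List (List Int)) : Int :=
  let b := skill.foldl pvRect board
  b.foldl (fun acc row => row.foldl (fun acc v => if 0 < v then acc + 1 else acc) acc) (0:Int)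

-- ===== PRECONDITION & SPEC =====
-- Pre_ restricts to the problem's natural domain (as the original task guarantees): a
-- nonempty rectangular board and skills [t,r1,c1,r2,c2,d] with 0 ≤ r1 ≤ r2 < rows and
-- 0 ≤ c1 ≤ c2 < cols; with no skills the board may also be ragged (rows up to cols+1
-- long), where A returns and B agrees.  This excludes some inputs on which A still
-- returns: inverted rectangles (r1 > r2 or c1 > c2) and negative indices, where A's
-- partial/wrapped difference-array application is an accident of its implementation,
-- and ragged boards hit by a skill, where A's per-row truncation is accidental (B
-- raises there).
def Pre_solution (board : List (List Int)) (skill : List (List Int)) : Prop :=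
  board ≠ [] ∧
  ((skill = [] ∧ ∀ row ∈ board, row.length ≤ (board.headD []).length + 1) ∨
   ((∀ row ∈ board, row.length = (board.headD []).length) ∧
    (∀ s ∈ skill, s.length = 6 ∧
      0 ≤ s.getD 1 0 ∧ s.getD 1 0 ≤ s.getD 3 0 ∧ s.getD 3 0 < (board.length : Int) ∧
      0 ≤ s.getD 2 0 ∧ s.getD 2 0 ≤ s.getD 4 0 ∧ s.getD 4 0 < ((board.headD []).length : Int))))
instance (board : List (List Int)) (skill : List (List Int)) : Decidable (Pre_solution board skill) := by
  unfold Pre_solution; infer_instance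

def pvWitness_solution : List (List Int) × List (List Int) :=
  ([[1, 1], [-1, 1]], [[2, 0, 0, 1, 1, 3], [1, 0, 1, 1, 1, 2]])

def Spec_solution (board : List (List Int)) (skill : List (List Int)) (out : Int) : Prop := out = solution_alt board skill
instance (board : List (List Int)) (skill : List (List Int)) (out : Int) : Decidable (Spec_solution board skill out) := by unfold Spec_solution; infer_instance

-- ===== CLAIM (what is proved, stated in full; the proofs are below) =====
def Claim_equal_solution : Prop := ∀ (board : List (List Int)) (skill : List (List Int)), Dom_solution board skill → Pre_solution board skill → Spec_solution board skill (solution board skill)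

-- ===== LEMMAS AND PROOFS =====

-- cell (i,j) of a matrix, 0 outside
def g2 (m : List (List Int)) (i j : Nat) : Int := (m.getD i []).getD j 0

-- shape: R rows, each of length C
def Shp (m : List (List Int)) (R C : Nat) : Prop := m.length = R ∧ ∀ i < R, (m.getD i []).length = C

-- a well-formed skill for an R × C board (the per-skill conjunct of Pre_)
def OkS (s : List Int) (R C : Nat) : Prop := s.length = 6 ∧
  0 ≤ s.getD 1 0 ∧ s.getD 1 0 ≤ s.getD 3 0 ∧ s.getD 3 0 < (R:Int) ∧
  0 ≤ s.getD 2 0 ∧ s.getD 2 0 ≤ s.getD 4 0 ∧ s.getD 4 0 < ((C:Int))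

-- the four-corner difference contribution of one skill at cell (i,j)
def cornerv (s : List Int) (i j : Nat) : Int :=
  match s with
  | [t, r1, c1, r2, c2, d] =>
    (if (i:Int) = r1 ∧ (j:Int) = c1 then (if t = 2 then d else -d) else 0)
  + (if (i:Int) = r1 ∧ (j:Int) = c2+1 then (if t = 2 then -d else d) else 0)
  + (if (i:Int) = r2+1 ∧ (j:Int) = c1 then (if t = 2 then -d else d) else 0)
  + (if (i:Int) = r2+1 ∧ (j:Int) = c2+1 then (if t = 2 then d else -d) else 0)
  | _ => 0

-- the rectangle contribution of one skill at cell (i,j)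
def rectv (s : List Int) (i j : Nat) : Int :=
  match s with
  | [t, r1, c1, r2, c2, d] =>
    if r1 ≤ (i:Int) ∧ (i:Int) ≤ r2 ∧ c1 ≤ (j:Int) ∧ (j:Int) ≤ c2 then (if t = 2 then d else -d) else 0
  | _ => 0

def fsum (c : List Int → Nat → Nat → Int) (skill : List (List Int)) (i j : Nat) : Int :=
  (skill.map (fun s => c s i j)).sum

lemma fsum_nil (c : List Int → Nat → Nat → Int) (i j : Nat) : fsum c [] i j = 0 := rfl

lemma fsum_cons (c : List Int → Nat → Nat → Int) (s : List Int) (skill : List (List Int)) (i j : Nat) :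
    fsum c (s :: skill) i j = c s i j + fsum c skill i j := by
  simp [fsum]

lemma list6 (s : List Int) (h : s.length = 6) :
    ∃ t r1 c1 r2 c2 d : Int, s = [t, r1, c1, r2, c2, d] := by
  rcases s with _ | ⟨t, _ | ⟨r1, _ | ⟨c1, _ | ⟨r2, _ | ⟨c2, _ | ⟨d, _ | ⟨x, s⟩⟩⟩⟩⟩⟩⟩ <;>
    first
      | exact ⟨t, r1, c1, r2, c2, d, rfl⟩
      | simp_all

lemma getD_set {α : Type} (xs : List α) (n k : Nat) (v d : α) :
    (xs.set n v).getD k d = if k = n ∧ n < xs.length then v else xs.getD k d := by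
  simp only [List.getD, List.getElem?_set]
  split_ifs with h1 h2 h3 h4 <;> simp_all

lemma sum_map_getD (xs : List Int) (f : Int → Int) (d : Int) :
    (xs.map f).sum = ∑ i ∈ Finset.range xs.length, f (xs.getD i d) := by
  induction xs with
  | nil => simp
  | cons x xs ih => rw [List.map_cons, List.sum_cons, List.length_cons, Finset.sum_range_succ', ih]
                    simp [List.getD, add_comm]

lemma sum_map_getD' (xs : List (List Int)) (f : List Int → Int) (d : List Int) :
    (xs.map f).sum = ∑ i ∈ Finset.range xs.length, f (xs.getD i d) := by
  induction xs with
  | nil => simp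
  | cons x xs ih => rw [List.map_cons, List.sum_cons, List.length_cons, Finset.sum_range_succ', ih]
                    simp [List.getD, add_comm]

lemma ind_sum (i : Nat) (a : Int) :
    ∑ t ∈ Finset.range (i+1), (if (t:Int) = a then (1:Int) else 0)
      = if 0 ≤ a ∧ a ≤ (i:Int) then 1 else 0 := by
  induction i with
  | zero => rw [Finset.sum_range_one]; split_ifs <;> omega
  | succ n ih => rw [Finset.sum_range_succ, ih]; split_ifs <;> push_cast at * <;> omega

-- pvAdd2 at nonnegative (cast) indices is a plain set
lemma pvAdd2_cast (m : List (List Int)) (a b : Nat) (v : Int) :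
    pvAdd2 m (a:Int) (b:Int) v
      = m.set a ((m.getD a []).set b ((m.getD a []).getD b 0 + v)) := by
  simp [pvAdd2]

lemma Shp_pvAdd2 (m : List (List Int)) (R C : Nat) (a b : Nat) (v : Int)
    (hS : Shp m R C) : Shp (pvAdd2 m (a:Int) (b:Int) v) R C := by
  obtain ⟨h1, h2⟩ := hS
  refine ⟨by rw [pvAdd2_cast]; simpa using h1, fun i hi => ?_⟩
  rw [pvAdd2_cast, getD_set]
  split_ifs with h
  · obtain ⟨rfl, _⟩ := h
    simpa using h2 i hi
  · exact h2 i hi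

lemma g2_pvAdd2 (m : List (List Int)) (a b : Nat) (v : Int)
    (ha : a < m.length) (hb : b < (m.getD a []).length) (i j : Nat) :
    g2 (pvAdd2 m (a:Int) (b:Int) v) i j = g2 m i j + if i = a ∧ j = b then v else 0 := by
  rw [pvAdd2_cast]
  unfold g2
  rw [getD_set]
  split_ifs with h1 h2 h3
  · obtain ⟨rfl, -⟩ := h1
    rw [getD_set]
    split_ifs with h4
    · obtain ⟨rfl, -⟩ := h4
      exact (h2.2 ▸ rfl)
    · exfalso; exact h4 ⟨h2.2, hb⟩
  · obtain ⟨rfl, -⟩ := h1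
    rw [getD_set]
    split_ifs with h4
    · exact absurd ⟨rfl, h4.1⟩ h2
    · ring
  · exact absurd ⟨h3.1, ha⟩ h1
  · ring

lemma Shp_rep (R C : Nat) :
    Shp (List.replicate (R+1) (List.replicate (C+1) (0:Int))) (R+1) (C+1) := by
  refine ⟨by simp, fun i hi => ?_⟩
  rw [List.getD, List.getElem?_replicate]
  simp [hi]

lemma g2_rep (R C : Nat) (i j : Nat) :
    g2 (List.replicate (R+1) (List.replicate (C+1) (0:Int))) i j = 0 := by
  simp only [g2, List.getD, List.getElem?_replicate]
  split_ifs <;> simp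

lemma g2_pvAdd2S (m : List (List Int)) (R' C' : Nat) (hS : Shp m R' C') (a b : Nat)
    (ha : a < R') (hb : b < C') (v : Int) (i j : Nat) :
    g2 (pvAdd2 m (a:Int) (b:Int) v) i j = g2 m i j + if i = a ∧ j = b then v else 0 :=
  g2_pvAdd2 m a b v (hS.1 ▸ ha) (by rw [hS.2 a ha]; exact hb) i j

-- ===== skill pass of A =====
lemma stepA (R C : Nat) (s : List Int) (hs : OkS s R C) (ps : List (List Int))
    (hS : Shp ps (R+1) (C+1)) :
    Shp (pvSkillPassA ps s) (R+1) (C+1) ∧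
    ∀ i j : Nat, g2 (pvSkillPassA ps s) i j = g2 ps i j + cornerv s i j := by
  obtain ⟨t, r1, c1, r2, c2, d, rfl⟩ := list6 s hs.1
  obtain ⟨-, h1, h2, h3, h4, h5, h6⟩ := hs
  simp only [List.getD_cons_zero, List.getD_cons_succ] at h1 h2 h3 h4 h5 h6
  obtain ⟨a, rfl⟩ := Int.eq_ofNat_of_zero_le h1
  obtain ⟨c, rfl⟩ := Int.eq_ofNat_of_zero_le h4
  obtain ⟨b, rfl⟩ := Int.eq_ofNat_of_zero_le (le_trans h1 h2)
  obtain ⟨e, rfl⟩ := Int.eq_ofNat_of_zero_le (le_trans h4 h5)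
  have eb : ((b:Int)+1) = ((b+1:Nat):Int) := by push_cast; ring
  have ee : ((e:Int)+1) = ((e+1:Nat):Int) := by push_cast; ring
  simp only [pvSkillPassA]
  rw [eb, ee]
  have D1 := Shp_pvAdd2 ps (R+1) (C+1) a c (if t = 2 then d else -d) hS
  have D2 := Shp_pvAdd2 _ (R+1) (C+1) a (e+1) (if t = 2 then -d else d) D1
  have D3 := Shp_pvAdd2 _ (R+1) (C+1) (b+1) c (if t = 2 then -d else d) D2
  have D4 := Shp_pvAdd2 _ (R+1) (C+1) (b+1) (e+1) (if t = 2 then d else -d) D3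
  refine ⟨D4, fun i j => ?_⟩
  rw [g2_pvAdd2S _ _ _ D3 (b+1) (e+1) (by omega) (by omega) _ i j,
      g2_pvAdd2S _ _ _ D2 (b+1) c (by omega) (by omega) _ i j,
      g2_pvAdd2S _ _ _ D1 a (e+1) (by omega) (by omega) _ i j,
      g2_pvAdd2S _ _ _ hS a c (by omega) (by omega) _ i j]
  simp only [cornerv, eb, ee, Nat.cast_inj]
  ring

lemma foldA (R C : Nat) (skill : List (List Int)) (hsk : ∀ s ∈ skill, OkS s R C) :
    ∀ ps, Shp ps (R+1) (C+1) →
      Shp (skill.foldl pvSkillPassA ps) (R+1) (C+1) ∧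
      ∀ i j : Nat, g2 (skill.foldl pvSkillPassA ps) i j = g2 ps i j + fsum cornerv skill i j := by
  induction skill with
  | nil => intro ps hS; exact ⟨hS, fun i j => by simp [fsum_nil]⟩
  | cons s rest ih =>
    intro ps hS
    obtain ⟨hSh, hg⟩ := stepA R C s (hsk s (by simp)) ps hS
    obtain ⟨hSh2, hg2⟩ := ih (fun s hs => hsk s (by simp [hs])) (pvSkillPassA ps s) hSh
    refine ⟨hSh2, fun i j => ?_⟩
    rw [List.foldl_cons] at *
    rw [hg2, hg, fsum_cons]
    ring

-- ===== row-prefix pass of A =====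
lemma innerRow (R C : Nat) (a : Nat) (haR : a < R) :
    ∀ n, n ≤ C → ∀ ps, Shp ps (R+1) (C+1) →
      Shp ((PySem.List.pyRange 0 (n:Int) 1).foldl (pvRowIn (a:Int)) ps) (R+1) (C+1) ∧
      ∀ i j : Nat,
        g2 ((PySem.List.pyRange 0 (n:Int) 1).foldl (pvRowIn (a:Int)) ps) i j
          = if i = a ∧ j ≤ n then ∑ u ∈ Finset.range (j+1), g2 ps i u else g2 ps i j := by
  intro n
  induction n with
  | zero =>
    intro _ ps hS
    rw [show ((0:Nat):Int) = (0:Int) by simp, PySem.List.pyRange_one_eq_nil le_rfl, List.foldl_nil]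
    refine ⟨hS, fun i j => ?_⟩
    split_ifs with h
    · obtain ⟨-, hj⟩ := h
      obtain rfl : j = 0 := by omega
      rw [Finset.sum_range_one]
    · rfl
  | succ k ihk =>
    intro hk ps hS
    rw [show ((k+1:Nat):Int) = (k:Int)+1 by push_cast; ring,
        PySem.List.pyRange_one_succ_right (Int.natCast_nonneg k),
        List.foldl_append, List.foldl_cons, List.foldl_nil]
    obtain ⟨ihS, ihg⟩ := ihk (by omega) ps hS
    set M := (PySem.List.pyRange 0 (k:Int) 1).foldl (pvRowIn (a:Int)) ps with hM
    simp only [pvRowIn]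
    have hv : PySem.List.pyGetD (PySem.List.pyGetD M (a:Int) []) (k:Int) 0 = g2 M a k := by
      simp [g2]
    rw [hv, show ((k:Int)+1) = ((k+1:Nat):Int) by push_cast; ring]
    have hval : g2 M a k = ∑ u ∈ Finset.range (k+1), g2 ps a u := by
      rw [ihg a k, if_pos ⟨rfl, le_refl k⟩]
    refine ⟨Shp_pvAdd2 _ _ _ _ _ _ ihS, fun i j => ?_⟩
    rw [g2_pvAdd2S _ _ _ ihS a (k+1) (by omega) (by omega) _ i j, ihg i j, hval]
    by_cases hia : i = a
    · subst hia
      by_cases hj : j ≤ k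
      · rw [if_pos ⟨rfl, hj⟩, if_neg (fun h => absurd h.2 (by omega)),
            if_pos ⟨rfl, (by omega : j ≤ k+1)⟩]
        ring
      · by_cases hj2 : j = k+1
        · subst hj2
          rw [if_neg (fun h => hj h.2), if_pos ⟨rfl, rfl⟩, if_pos ⟨rfl, le_refl _⟩]
          conv_rhs => rw [Finset.sum_range_succ]
          ring
        · rw [if_neg (fun h => hj h.2), if_neg (fun h => hj2 h.2),
              if_neg (fun h => absurd h.2 (by omega))]
          ring
    · rw [if_neg (fun h => hia h.1), if_neg (fun h => hia h.1), if_neg (fun h => hia h.1)]; ring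

lemma passRow (R C : Nat) :
    ∀ n, n ≤ R → ∀ ps, Shp ps (R+1) (C+1) →
      Shp ((PySem.List.pyRange 0 (n:Int) 1).foldl (fun ps i =>
            (PySem.List.pyRange 0 (((PySem.List.pyGetD ps 0 []).length : Int) - 1) 1).foldl (pvRowIn i) ps) ps) (R+1) (C+1) ∧
      ∀ i j : Nat, j ≤ C →
        g2 ((PySem.List.pyRange 0 (n:Int) 1).foldl (fun ps i =>
            (PySem.List.pyRange 0 (((PySem.List.pyGetD ps 0 []).length : Int) - 1) 1).foldl (pvRowIn i) ps) ps) i j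
          = if i < n then ∑ u ∈ Finset.range (j+1), g2 ps i u else g2 ps i j := by
  intro n
  induction n with
  | zero =>
    intro _ ps hS
    rw [show ((0:Nat):Int) = (0:Int) by simp, PySem.List.pyRange_one_eq_nil le_rfl, List.foldl_nil]
    exact ⟨hS, fun i j _ => by rw [if_neg (by omega)]⟩
  | succ k ihk =>
    intro hk ps hS
    rw [show ((k+1:Nat):Int) = (k:Int)+1 by push_cast; ring,
        PySem.List.pyRange_one_succ_right (Int.natCast_nonneg k)]
    simp only [List.foldl_append, List.foldl_cons, List.foldl_nil]
    obtain ⟨ihS, ihg⟩ := ihk (by omega) ps hS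
    set M := (PySem.List.pyRange 0 (k:Int) 1).foldl (fun ps i =>
      (PySem.List.pyRange 0 (((PySem.List.pyGetD ps 0 []).length : Int) - 1) 1).foldl (pvRowIn i) ps) ps with hM
    have hb : ((PySem.List.pyGetD M 0 []).length : Int) - 1 = (C:Int) := by
      rw [PySem.List.pyGetD_zero, ihS.2 0 (by omega)]; push_cast; ring
    rw [hb]
    obtain ⟨S', g'⟩ := innerRow R C k (by omega) C le_rfl M ihS
    refine ⟨S', fun i j hj => ?_⟩
    rw [g' i j]
    by_cases hik : i = k
    · subst hik
      rw [if_pos ⟨rfl, hj⟩, if_pos (by omega : i < i+1)]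
      refine Finset.sum_congr rfl (fun u hu => ?_)
      rw [ihg i u (by rw [Finset.mem_range] at hu; omega), if_neg (by omega)]
    · rw [if_neg (fun h => hik h.1), ihg i j hj]
      by_cases hlt : i < k
      · rw [if_pos hlt, if_pos (by omega)]
      · rw [if_neg hlt, if_neg (by omega)]

-- ===== column-prefix pass of A =====
lemma innerCol (R C : Nat) (b : Nat) (hbC : b < C) :
    ∀ n, n ≤ R → ∀ ps, Shp ps (R+1) (C+1) →
      Shp ((PySem.List.pyRange 0 (n:Int) 1).foldl (pvColIn (b:Int)) ps) (R+1) (C+1) ∧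
      ∀ i j : Nat,
        g2 ((PySem.List.pyRange 0 (n:Int) 1).foldl (pvColIn (b:Int)) ps) i j
          = if j = b ∧ i ≤ n then ∑ t ∈ Finset.range (i+1), g2 ps t j else g2 ps i j := by
  intro n
  induction n with
  | zero =>
    intro _ ps hS
    rw [show ((0:Nat):Int) = (0:Int) by simp, PySem.List.pyRange_one_eq_nil le_rfl, List.foldl_nil]
    refine ⟨hS, fun i j => ?_⟩
    split_ifs with h
    · obtain ⟨-, hi⟩ := h
      obtain rfl : i = 0 := by omega
      rw [Finset.sum_range_one]
    · rfl
  | succ k ihk =>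
    intro hk ps hS
    rw [show ((k+1:Nat):Int) = (k:Int)+1 by push_cast; ring,
        PySem.List.pyRange_one_succ_right (Int.natCast_nonneg k),
        List.foldl_append, List.foldl_cons, List.foldl_nil]
    obtain ⟨ihS, ihg⟩ := ihk (by omega) ps hS
    set M := (PySem.List.pyRange 0 (k:Int) 1).foldl (pvColIn (b:Int)) ps with hM
    simp only [pvColIn]
    have hv : PySem.List.pyGetD (PySem.List.pyGetD M (k:Int) []) (b:Int) 0 = g2 M k b := by
      simp [g2]
    rw [hv, show ((k:Int)+1) = ((k+1:Nat):Int) by push_cast; ring]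
    have hval : g2 M k b = ∑ t ∈ Finset.range (k+1), g2 ps t b := by
      rw [ihg k b, if_pos ⟨rfl, le_refl k⟩]
    refine ⟨Shp_pvAdd2 _ _ _ _ _ _ ihS, fun i j => ?_⟩
    rw [g2_pvAdd2S _ _ _ ihS (k+1) b (by omega) (by omega) _ i j, ihg i j, hval]
    by_cases hjb : j = b
    · subst hjb
      by_cases hi : i ≤ k
      · rw [if_pos ⟨rfl, hi⟩, if_neg (fun h => absurd h.2 (by omega)),
            if_pos ⟨rfl, (by omega : i ≤ k+1)⟩]
        ring
      · by_cases hi2 : i = k+1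
        · subst hi2
          rw [if_neg (fun h => hi h.2), if_pos ⟨rfl, rfl⟩, if_pos ⟨rfl, le_refl _⟩]
          conv_rhs => rw [Finset.sum_range_succ]
          ring
        · rw [if_neg (fun h => hi h.2), if_neg (fun h => hi2 h.1),
              if_neg (fun h => absurd h.2 (by omega))]
          ring
    · rw [if_neg (fun h => hjb h.1), if_neg (fun h => hjb h.2), if_neg (fun h => hjb h.1)]; ring

lemma passCol (R C : Nat) :
    ∀ n, n ≤ C → ∀ ps, Shp ps (R+1) (C+1) →
      Shp ((PySem.List.pyRange 0 (n:Int) 1).foldl (fun ps j =>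
            (PySem.List.pyRange 0 ((ps.length : Int) - 1) 1).foldl (pvColIn j) ps) ps) (R+1) (C+1) ∧
      ∀ i j : Nat, i ≤ R →
        g2 ((PySem.List.pyRange 0 (n:Int) 1).foldl (fun ps j =>
            (PySem.List.pyRange 0 ((ps.length : Int) - 1) 1).foldl (pvColIn j) ps) ps) i j
          = if j < n then ∑ t ∈ Finset.range (i+1), g2 ps t j else g2 ps i j := by
  intro n
  induction n with
  | zero =>
    intro _ ps hS
    rw [show ((0:Nat):Int) = (0:Int) by simp, PySem.List.pyRange_one_eq_nil le_rfl, List.foldl_nil]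
    exact ⟨hS, fun i j _ => by rw [if_neg (by omega)]⟩
  | succ k ihk =>
    intro hk ps hS
    rw [show ((k+1:Nat):Int) = (k:Int)+1 by push_cast; ring,
        PySem.List.pyRange_one_succ_right (Int.natCast_nonneg k)]
    simp only [List.foldl_append, List.foldl_cons, List.foldl_nil]
    obtain ⟨ihS, ihg⟩ := ihk (by omega) ps hS
    set M := (PySem.List.pyRange 0 (k:Int) 1).foldl (fun ps j =>
      (PySem.List.pyRange 0 ((ps.length : Int) - 1) 1).foldl (pvColIn j) ps) ps with hM
    have hb : ((M.length : Int)) - 1 = (R:Int) := by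
      rw [ihS.1]; push_cast; ring
    rw [hb]
    obtain ⟨S', g'⟩ := innerCol R C k (by omega) R le_rfl M ihS
    refine ⟨S', fun i j hi => ?_⟩
    rw [g' i j]
    by_cases hjk : j = k
    · subst hjk
      rw [if_pos ⟨rfl, hi⟩, if_pos (by omega : j < j+1)]
      refine Finset.sum_congr rfl (fun t ht => ?_)
      rw [ihg t j (by rw [Finset.mem_range] at ht; omega), if_neg (by omega)]
    · rw [if_neg (fun h => hjk h.1), ihg i j hi]
      by_cases hlt : j < k
      · rw [if_pos hlt, if_pos (by omega)]
      · rw [if_neg hlt, if_neg (by omega)]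

-- ===== final counting pass of A =====
lemma innerCnt (R C : Nat) (m : List (List Int)) (a : Nat) (haR : a < R) :
    ∀ n, n ≤ C → ∀ (bd : List (List Int)) (ans : Int), Shp bd R C →
      Shp (((PySem.List.pyRange 0 (n:Int) 1).foldl (pvCntIn m (a:Int)) (bd, ans)).1) R C ∧
      (∀ i j : Nat, g2 (((PySem.List.pyRange 0 (n:Int) 1).foldl (pvCntIn m (a:Int)) (bd, ans)).1) i j
          = g2 bd i j + if i = a ∧ j < n then g2 m i j else 0) ∧
      ((PySem.List.pyRange 0 (n:Int) 1).foldl (pvCntIn m (a:Int)) (bd, ans)).2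
        = ans + ∑ j ∈ Finset.range n, (if 0 < g2 bd a j + g2 m a j then 1 else 0) := by
  intro n
  induction n with
  | zero =>
    intro _ bd ans hS
    rw [show ((0:Nat):Int) = (0:Int) by simp, PySem.List.pyRange_one_eq_nil le_rfl, List.foldl_nil]
    exact ⟨hS, fun i j => by rw [if_neg (by omega)]; ring, by simp⟩
  | succ k ihk =>
    intro hk bd ans hS
    rw [show ((k+1:Nat):Int) = (k:Int)+1 by push_cast; ring,
        PySem.List.pyRange_one_succ_right (Int.natCast_nonneg k),
        List.foldl_append, List.foldl_cons, List.foldl_nil]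
    obtain ⟨ihS, ihg, ihc⟩ := ihk (by omega) bd ans hS
    set P := (PySem.List.pyRange 0 (k:Int) 1).foldl (pvCntIn m (a:Int)) (bd, ans) with hP
    simp only [pvCntIn]
    have hv : PySem.List.pyGetD (PySem.List.pyGetD m (a:Int) []) (k:Int) 0 = g2 m a k := by
      simp [g2]
    rw [hv]
    have hnew : ∀ i j : Nat, g2 (pvAdd2 P.1 (a:Int) (k:Int) (g2 m a k)) i j
        = g2 P.1 i j + if i = a ∧ j = k then g2 m a k else 0 :=
      fun i j => g2_pvAdd2S P.1 R C ihS a k haR (by omega) (g2 m a k) i j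
    have hread : PySem.List.pyGetD (PySem.List.pyGetD (pvAdd2 P.1 (a:Int) (k:Int) (g2 m a k)) (a:Int) []) (k:Int) 0
        = g2 bd a k + g2 m a k := by
      have : PySem.List.pyGetD (PySem.List.pyGetD (pvAdd2 P.1 (a:Int) (k:Int) (g2 m a k)) (a:Int) []) (k:Int) 0
          = g2 (pvAdd2 P.1 (a:Int) (k:Int) (g2 m a k)) a k := by simp [g2]
      rw [this, hnew a k, if_pos ⟨rfl, rfl⟩, ihg a k, if_neg (by omega)]
      ring
    refine ⟨Shp_pvAdd2 _ _ _ _ _ _ ihS, fun i j => ?_, ?_⟩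
    · rw [hnew i j, ihg i j]
      by_cases hia : i = a
      · subst hia
        by_cases hj : j < k
        · rw [if_pos ⟨rfl, hj⟩, if_neg (fun h => absurd h.2 (by omega)),
              if_pos ⟨rfl, (by omega : j < k+1)⟩]
          ring
        · by_cases hj2 : j = k
          · subst hj2
            rw [if_neg (fun h => hj h.2), if_pos ⟨rfl, rfl⟩, if_pos ⟨rfl, by omega⟩]
            ring
          · rw [if_neg (fun h => hj h.2), if_neg (fun h => hj2 h.2),
                if_neg (fun h => absurd h.2 (by omega))]
            ring
      · rw [if_neg (fun h => hia h.1), if_neg (fun h => hia h.1), if_neg (fun h => hia h.1)]; ring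
    · rw [hread, ihc]
      conv_rhs => rw [Finset.sum_range_succ]
      split_ifs <;> ring

lemma outerCnt (R C : Nat) (m : List (List Int)) :
    ∀ n, n ≤ R → ∀ (bd : List (List Int)) (ans : Int), Shp bd R C →
      Shp (((PySem.List.pyRange 0 (n:Int) 1).foldl (fun st i =>
              (PySem.List.pyRange 0 ((PySem.List.pyGetD st.1 i []).length : Int) 1).foldl (pvCntIn m i) st) (bd, ans)).1) R C ∧
      (∀ i j : Nat, g2 (((PySem.List.pyRange 0 (n:Int) 1).foldl (fun st i =>
              (PySem.List.pyRange 0 ((PySem.List.pyGetD st.1 i []).length : Int) 1).foldl (pvCntIn m i) st) (bd, ans)).1) i j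
          = g2 bd i j + if i < n ∧ j < C then g2 m i j else 0) ∧
      ((PySem.List.pyRange 0 (n:Int) 1).foldl (fun st i =>
              (PySem.List.pyRange 0 ((PySem.List.pyGetD st.1 i []).length : Int) 1).foldl (pvCntIn m i) st) (bd, ans)).2
        = ans + ∑ i ∈ Finset.range n, ∑ j ∈ Finset.range C, (if 0 < g2 bd i j + g2 m i j then 1 else 0) := by
  intro n
  induction n with
  | zero =>
    intro _ bd ans hS
    rw [show ((0:Nat):Int) = (0:Int) by simp, PySem.List.pyRange_one_eq_nil le_rfl, List.foldl_nil]
    exact ⟨hS, fun i j => by rw [if_neg (by omega)]; ring, by simp⟩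
  | succ k ihk =>
    intro hk bd ans hS
    rw [show ((k+1:Nat):Int) = (k:Int)+1 by push_cast; ring,
        PySem.List.pyRange_one_succ_right (Int.natCast_nonneg k)]
    simp only [List.foldl_append, List.foldl_cons, List.foldl_nil]
    obtain ⟨ihS, ihg, ihc⟩ := ihk (by omega) bd ans hS
    set P := (PySem.List.pyRange 0 (k:Int) 1).foldl (fun st i =>
      (PySem.List.pyRange 0 ((PySem.List.pyGetD st.1 i []).length : Int) 1).foldl (pvCntIn m i) st) (bd, ans) with hP
    have hb : ((PySem.List.pyGetD P.1 (k:Int) []).length : Int) = (C:Int) := by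
      have : PySem.List.pyGetD P.1 (k:Int) [] = P.1.getD k [] := by simp
      rw [this, ihS.2 k (by omega)]
    rw [hb]
    obtain ⟨S', g', c'⟩ := innerCnt R C m k (by omega) C le_rfl P.1 P.2 ihS
    rw [Prod.mk.eta] at S' g' c'
    refine ⟨S', fun i j => ?_, ?_⟩
    · rw [g' i j, ihg i j]
      by_cases hik : i = k
      · subst hik
        by_cases hj : j < C
        · rw [if_neg (by omega), if_pos ⟨rfl, hj⟩, if_pos ⟨by omega, hj⟩]; ring
        · rw [if_neg (fun h => hj h.2), if_neg (fun h => hj h.2), if_neg (fun h => hj h.2)]; ring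
      · by_cases hlt : i < k
        · by_cases hj : j < C
          · rw [if_pos ⟨hlt, hj⟩, if_neg (fun h => hik h.1), if_pos ⟨by omega, hj⟩]; ring
          · rw [if_neg (fun h => hj h.2), if_neg (fun h => hik h.1), if_neg (fun h => hj h.2)]; ring
        · rw [if_neg (fun h => hlt h.1), if_neg (fun h => hik h.1), if_neg (by omega)]; ring
    · rw [c', ihc]
      conv_rhs => rw [Finset.sum_range_succ]
      have : ∑ j ∈ Finset.range C, (if 0 < g2 P.1 k j + g2 m k j then (1:Int) else 0)
          = ∑ j ∈ Finset.range C, (if 0 < g2 bd k j + g2 m k j then (1:Int) else 0) := by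
        refine Finset.sum_congr rfl (fun j hj => ?_)
        have hpk : g2 P.1 k j = g2 bd k j := by
          rw [ihg k j]; rw [if_neg (by omega : ¬(k < k ∧ j < C))]; ring
        rw [hpk]
      rw [this]
      ring

-- ===== the double prefix sum of the corners is the rectangle =====
set_option maxHeartbeats 2000000 in
lemma corner_rect (R C : Nat) (s : List Int) (hs : OkS s R C) (i j : Nat) (hi : i < R) (hj : j < C) :
    ∑ t ∈ Finset.range (i+1), ∑ u ∈ Finset.range (j+1), cornerv s t u = rectv s i j := by
  obtain ⟨t0, r1, c1, r2, c2, d, rfl⟩ := list6 s hs.1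
  obtain ⟨-, h1, h2, h3, h4, h5, h6⟩ := hs
  simp only [List.getD_cons_zero, List.getD_cons_succ] at h1 h2 h3 h4 h5 h6
  simp only [cornerv, rectv]
  have hneg : (if t0 = 2 then -d else d) = -(if t0 = 2 then d else -d) := by split_ifs <;> ring
  have hsplit : ∀ (x y : Nat) (p q v : Int),
      (if (x:Int) = p ∧ (y:Int) = q then v else 0)
        = ((if (x:Int) = p then (1:Int) else 0) * (if (y:Int) = q then (1:Int) else 0)) * v := by
    intro x y p q v
    by_cases hx : (x:Int) = p <;> by_cases hy : (y:Int) = q <;> simp [hx, hy]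
  simp only [hneg, hsplit]
  simp only [Finset.sum_add_distrib, ← Finset.sum_mul, ← Finset.mul_sum]
  simp only [ind_sum]
  have hiR : (i:Int) < (R:Int) := by exact_mod_cast hi
  have hjC : (j:Int) < (C:Int) := by exact_mod_cast hj
  split_ifs <;> first | ring1 | omega

lemma fsum_corner_rect (R C : Nat) (skill : List (List Int)) (hsk : ∀ s ∈ skill, OkS s R C)
    (i j : Nat) (hi : i < R) (hj : j < C) :
    ∑ t ∈ Finset.range (i+1), ∑ u ∈ Finset.range (j+1), fsum cornerv skill t u
      = fsum rectv skill i j := by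
  induction skill with
  | nil => simp [fsum_nil]
  | cons s rest ih =>
    simp only [fsum_cons, Finset.sum_add_distrib]
    rw [ih (fun s hs => hsk s (by simp [hs])), corner_rect R C s (hsk s (by simp)) i j hi hj]

-- ===== A's value =====
lemma A_val (board skill : List (List Int))
    (hS : Shp board board.length (board.headD []).length)
    (hsk : ∀ s ∈ skill, OkS s board.length (board.headD []).length) :
    solution board skill
      = ∑ i ∈ Finset.range board.length, ∑ j ∈ Finset.range (board.headD []).length,
          (if 0 < g2 board i j + fsum rectv skill i j then 1 else 0) := by
  have h00 : PySem.List.pyGetD board 0 [] = board.headD [] := by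
    rw [PySem.List.pyGetD_zero]; cases board <;> rfl
  simp only [solution, h00]
  set R := board.length with hR
  set C := (board.headD []).length with hC
  set ps0 := List.replicate (R + 1) (List.replicate (C + 1) (0:Int)) with hps0
  set ps1 := skill.foldl pvSkillPassA ps0 with hps1
  obtain ⟨hS1, hg1⟩ := foldA R C skill hsk ps0 (Shp_rep R C)
  rw [← hps1] at hS1 hg1
  have e1 : ((ps1.length : Int)) - 1 = (R:Int) := by rw [hS1.1]; push_cast; ring
  rw [e1]
  set ps2 := (PySem.List.pyRange 0 (R:Int) 1).foldl (fun ps i =>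
      (PySem.List.pyRange 0 (((PySem.List.pyGetD ps 0 []).length : Int) - 1) 1).foldl (pvRowIn i) ps) ps1 with hps2
  obtain ⟨hS2, hg2⟩ := passRow R C R le_rfl ps1 hS1
  rw [← hps2] at hS2 hg2
  have e2 : ((PySem.List.pyGetD ps2 0 []).length : Int) - 1 = (C:Int) := by
    rw [PySem.List.pyGetD_zero, hS2.2 0 (by omega)]; push_cast; ring
  rw [e2]
  set ps3 := (PySem.List.pyRange 0 (C:Int) 1).foldl (fun ps j =>
      (PySem.List.pyRange 0 ((ps.length : Int) - 1) 1).foldl (pvColIn j) ps) ps2 with hps3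
  obtain ⟨hS3, hg3⟩ := passCol R C C le_rfl ps2 hS2
  rw [← hps3] at hS3 hg3
  obtain ⟨-, -, hcnt⟩ := outerCnt R C ps3 R le_rfl board 0 hS
  rw [hcnt, zero_add]
  refine Finset.sum_congr rfl (fun i hi => Finset.sum_congr rfl (fun j hj => ?_))
  rw [Finset.mem_range] at hi hj
  have key : g2 ps3 i j = fsum rectv skill i j := by
    rw [hg3 i j (by omega), if_pos hj]
    have step1 : ∀ t ∈ Finset.range (i+1),
        g2 ps2 t j = ∑ u ∈ Finset.range (j+1), fsum cornerv skill t u := by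
      intro t ht
      rw [Finset.mem_range] at ht
      rw [hg2 t j (by omega), if_pos (by omega : t < R)]
      refine Finset.sum_congr rfl (fun u hu => ?_)
      rw [hg1 t u, g2_rep, zero_add]
    rw [Finset.sum_congr rfl step1]
    exact fsum_corner_rect R C skill hsk i j hi hj
  rw [key]

-- ===== B side =====
lemma innerB (delta : Int) (c1 c2 : Nat) (row : List Int) (hc2 : c2 < row.length) :
    ∀ n, c1 ≤ n → n ≤ c2 + 1 →
      ((PySem.List.pyRange (c1:Int) (n:Int) 1).foldl (pvCellIn delta) row).length = row.length ∧
      ∀ j : Nat, ((PySem.List.pyRange (c1:Int) (n:Int) 1).foldl (pvCellIn delta) row).getD j 0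
        = row.getD j 0 + if c1 ≤ j ∧ j < n then delta else 0 := by
  intro n hn
  induction n, hn using Nat.le_induction with
  | base =>
    intro _
    rw [PySem.List.pyRange_one_eq_nil le_rfl, List.foldl_nil]
    exact ⟨rfl, fun j => by rw [if_neg (by omega)]; ring⟩
  | succ m hm ih =>
    intro hm1
    obtain ⟨ihl, ihg⟩ := ih (by omega)
    rw [show ((m+1:Nat):Int) = (m:Int)+1 by push_cast; ring,
        PySem.List.pyRange_one_succ_right (by exact_mod_cast hm),
        List.foldl_append, List.foldl_cons, List.foldl_nil]
    set Rw := (PySem.List.pyRange (c1:Int) (m:Int) 1).foldl (pvCellIn delta) row with hRw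
    simp only [pvCellIn, PySem.List.pySetD_natCast, PySem.List.pyGetD_natCast]
    have hmlen : m < Rw.length := by rw [ihl]; omega
    refine ⟨by rw [List.length_set, ihl], fun j => ?_⟩
    rw [getD_set Rw m j _ 0]
    by_cases hjm : j = m
    · subst hjm
      rw [if_pos ⟨rfl, hmlen⟩, ihg j, if_neg (by omega), if_pos ⟨(by omega : c1 ≤ j), by omega⟩]
      ring
    · rw [if_neg (fun h => hjm h.1), ihg j]
      by_cases hc : c1 ≤ j ∧ j < m
      · rw [if_pos hc, if_pos ⟨hc.1, by omega⟩]
      · rw [if_neg hc, if_neg (fun h => hc ⟨h.1, by omega⟩)]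

lemma outerB (R C : Nat) (delta : Int) (r1 c1 r2 c2 : Nat)
    (hr2 : r2 < R) (hc2 : c2 < C) (hc12 : c1 ≤ c2 + 1) :
    ∀ n, r1 ≤ n → n ≤ r2 + 1 → ∀ b, Shp b R C →
      Shp ((PySem.List.pyRange (r1:Int) (n:Int) 1).foldl (pvRowUpd (c1:Int) (c2:Int) delta) b) R C ∧
      ∀ i j : Nat, g2 ((PySem.List.pyRange (r1:Int) (n:Int) 1).foldl (pvRowUpd (c1:Int) (c2:Int) delta) b) i j
        = g2 b i j + if r1 ≤ i ∧ i < n ∧ c1 ≤ j ∧ j ≤ c2 then delta else 0 := by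
  intro n hn
  induction n, hn using Nat.le_induction with
  | base =>
    intro _ b hS
    rw [PySem.List.pyRange_one_eq_nil le_rfl, List.foldl_nil]
    exact ⟨hS, fun i j => by rw [if_neg (by omega)]; ring⟩
  | succ m hm ih =>
    intro hm1 b hS
    obtain ⟨ihS, ihg⟩ := ih (by omega) b hS
    rw [show ((m+1:Nat):Int) = (m:Int)+1 by push_cast; ring,
        PySem.List.pyRange_one_succ_right (by exact_mod_cast hm),
        List.foldl_append, List.foldl_cons, List.foldl_nil]
    set B := (PySem.List.pyRange (r1:Int) (m:Int) 1).foldl (pvRowUpd (c1:Int) (c2:Int) delta) b with hB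
    simp only [pvRowUpd, PySem.List.pySetD_natCast, PySem.List.pyGetD_natCast]
    rw [show ((c2:Int)+1) = ((c2+1:Nat):Int) by push_cast; ring]
    have hrowlen : (B.getD m []).length = C := ihS.2 m (by omega)
    obtain ⟨il, ig⟩ := innerB delta c1 c2 (B.getD m []) (by rw [hrowlen]; exact hc2) (c2+1) hc12 le_rfl
    have hBlen : m < B.length := by rw [ihS.1]; omega
    refine ⟨⟨by rw [List.length_set, ihS.1], fun i hi => ?_⟩, fun i j => ?_⟩
    · rw [getD_set B m i _ []]
      split_ifs with h
      · rw [il, hrowlen]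
      · exact ihS.2 i hi
    · unfold g2
      rw [getD_set B m i _ []]
      by_cases him : i = m
      · subst him
        rw [if_pos ⟨rfl, hBlen⟩, ig j]
        have hgB : (B.getD i []).getD j 0 = g2 B i j := rfl
        rw [hgB, ihg i j, if_neg (by omega)]
        by_cases hc : c1 ≤ j ∧ j < c2+1
        · rw [if_pos hc, if_pos ⟨by omega, by omega, hc.1, by omega⟩]; unfold g2; ring
        · rw [if_neg hc, if_neg (fun h => hc ⟨h.2.2.1, by omega⟩)]; unfold g2; ring
      · rw [if_neg (fun h => him h.1)]
        have hgB : (B.getD i []).getD j 0 = g2 B i j := rfl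
        rw [hgB, ihg i j]
        by_cases hc : r1 ≤ i ∧ i < m ∧ c1 ≤ j ∧ j ≤ c2
        · rw [if_pos hc, if_pos ⟨hc.1, by omega, hc.2.2⟩]; unfold g2; ring
        · rw [if_neg hc, if_neg (fun h => hc ⟨h.1, by omega, h.2.2⟩)]; unfold g2; ring

lemma stepB (R C : Nat) (s : List Int) (hs : OkS s R C) (b : List (List Int))
    (hS : Shp b R C) :
    Shp (pvRect b s) R C ∧
    ∀ i j : Nat, g2 (pvRect b s) i j = g2 b i j + rectv s i j := by
  obtain ⟨t0, r1, c1, r2, c2, d, rfl⟩ := list6 s hs.1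
  obtain ⟨-, h1, h2, h3, h4, h5, h6⟩ := hs
  simp only [List.getD_cons_zero, List.getD_cons_succ] at h1 h2 h3 h4 h5 h6
  obtain ⟨a, rfl⟩ := Int.eq_ofNat_of_zero_le h1
  obtain ⟨c, rfl⟩ := Int.eq_ofNat_of_zero_le h4
  obtain ⟨b2, rfl⟩ := Int.eq_ofNat_of_zero_le (le_trans h1 h2)
  obtain ⟨e, rfl⟩ := Int.eq_ofNat_of_zero_le (le_trans h4 h5)
  simp only [pvRect]
  rw [show ((b2:Int)+1) = ((b2+1:Nat):Int) by push_cast; ring]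
  obtain ⟨S', g'⟩ := outerB R C (if t0 = 2 then d else -d) a c b2 e (by omega) (by omega) (by omega)
    (b2+1) (by omega) le_rfl b hS
  refine ⟨S', fun i j => ?_⟩
  rw [g' i j]
  simp only [rectv]
  split_ifs <;> first | rfl | (exfalso; omega)

lemma foldB (R C : Nat) (skill : List (List Int)) (hsk : ∀ s ∈ skill, OkS s R C) :
    ∀ b, Shp b R C →
      Shp (skill.foldl pvRect b) R C ∧
      ∀ i j : Nat, g2 (skill.foldl pvRect b) i j = g2 b i j + fsum rectv skill i j := by
  induction skill with
  | nil => intro b hS; exact ⟨hS, fun i j => by simp [fsum_nil]⟩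
  | cons s rest ih =>
    intro b hS
    obtain ⟨hSh, hg⟩ := stepB R C s (hsk s (by simp)) b hS
    obtain ⟨hSh2, hg2⟩ := ih (fun s hs => hsk s (by simp [hs])) (pvRect b s) hSh
    refine ⟨hSh2, fun i j => ?_⟩
    rw [List.foldl_cons, hg2, hg, fsum_cons]
    ring

lemma rowcount (row : List Int) :
    ∀ acc : Int, row.foldl (fun acc v => if 0 < v then acc + 1 else acc) acc
      = acc + (row.map (fun v => if 0 < v then (1:Int) else 0)).sum := by
  induction row with
  | nil => simp
  | cons x xs ih =>
    intro acc
    rw [List.foldl_cons, ih, List.map_cons, List.sum_cons]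
    split_ifs <;> ring

lemma totalcount (b : List (List Int)) :
    ∀ acc : Int, b.foldl (fun acc row => row.foldl (fun acc v => if 0 < v then acc + 1 else acc) acc) acc
      = acc + (b.map (fun row => (row.map (fun v => if 0 < v then (1:Int) else 0)).sum)).sum := by
  induction b with
  | nil => simp
  | cons row rest ih =>
    intro acc
    rw [List.foldl_cons, ih, rowcount, List.map_cons, List.sum_cons]
    ring

lemma B_val (board skill : List (List Int))
    (hS : Shp board board.length (board.headD []).length)
    (hsk : ∀ s ∈ skill, OkS s board.length (board.headD []).length) :
    solution_alt board skill
      = ∑ i ∈ Finset.range board.length, ∑ j ∈ Finset.range (board.headD []).length,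
          (if 0 < g2 board i j + fsum rectv skill i j then 1 else 0) := by
  simp only [solution_alt]
  obtain ⟨hSb, hgb⟩ := foldB board.length (board.headD []).length skill hsk board hS
  rw [totalcount _ 0, zero_add, sum_map_getD' _ _ [], hSb.1]
  refine Finset.sum_congr rfl (fun i hi => ?_)
  rw [Finset.mem_range] at hi
  rw [sum_map_getD _ _ 0, hSb.2 i hi]
  refine Finset.sum_congr rfl (fun j hj => ?_)
  have hg : ((skill.foldl pvRect board).getD i []).getD j 0 = g2 (skill.foldl pvRect board) i j := rfl
  rw [hg, hgb i j]

-- ===== the skill = [] case: the board may be ragged =====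
lemma len_pvAdd2 (m : List (List Int)) (a b : Nat) (v : Int) :
    (pvAdd2 m (a:Int) (b:Int) v).length = m.length := by
  rw [pvAdd2_cast]; simp

lemma rowlen_pvAdd2 (m : List (List Int)) (a b : Nat) (v : Int) (k : Nat) :
    ((pvAdd2 m (a:Int) (b:Int) v).getD k []).length = (m.getD k []).length := by
  rw [pvAdd2_cast, getD_set]
  split_ifs with h
  · obtain ⟨rfl, -⟩ := h; simp
  · rfl

lemma innerCnt0 (m : List (List Int)) (hm : ∀ i j : Nat, g2 m i j = 0) (a : Nat) :
    ∀ n : Nat, ∀ (bd : List (List Int)) (ans : Int), a < bd.length → n ≤ (bd.getD a []).length →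
      ((PySem.List.pyRange 0 (n:Int) 1).foldl (pvCntIn m (a:Int)) (bd, ans)).1.length = bd.length ∧
      (∀ k : Nat, (((PySem.List.pyRange 0 (n:Int) 1).foldl (pvCntIn m (a:Int)) (bd, ans)).1.getD k []).length
        = (bd.getD k []).length) ∧
      (∀ i j : Nat, g2 ((PySem.List.pyRange 0 (n:Int) 1).foldl (pvCntIn m (a:Int)) (bd, ans)).1 i j = g2 bd i j) ∧
      ((PySem.List.pyRange 0 (n:Int) 1).foldl (pvCntIn m (a:Int)) (bd, ans)).2
        = ans + ∑ j ∈ Finset.range n, (if 0 < g2 bd a j then 1 else 0) := by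
  intro n
  induction n with
  | zero =>
    intro bd ans _ _
    rw [show ((0:Nat):Int) = (0:Int) by simp, PySem.List.pyRange_one_eq_nil le_rfl, List.foldl_nil]
    exact ⟨rfl, fun k => rfl, fun i j => rfl, by simp⟩
  | succ k ihk =>
    intro bd ans ha hn
    rw [show ((k+1:Nat):Int) = (k:Int)+1 by push_cast; ring,
        PySem.List.pyRange_one_succ_right (Int.natCast_nonneg k),
        List.foldl_append, List.foldl_cons, List.foldl_nil]
    obtain ⟨ihl, ihrl, ihg, ihc⟩ := ihk bd ans ha (by omega)
    set P := (PySem.List.pyRange 0 (k:Int) 1).foldl (pvCntIn m (a:Int)) (bd, ans) with hP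
    simp only [pvCntIn]
    have hv : PySem.List.pyGetD (PySem.List.pyGetD m (a:Int) []) (k:Int) 0 = g2 m a k := by
      simp [g2]
    rw [hv, hm a k]
    have haP : a < P.1.length := by rw [ihl]; exact ha
    have hkP : k < (P.1.getD a []).length := by rw [ihrl a]; omega
    have hg' : ∀ i j : Nat, g2 (pvAdd2 P.1 (a:Int) (k:Int) 0) i j = g2 bd i j := by
      intro i j
      rw [g2_pvAdd2 P.1 a k 0 haP hkP i j, ihg i j]
      split_ifs <;> ring
    have hread : PySem.List.pyGetD (PySem.List.pyGetD (pvAdd2 P.1 (a:Int) (k:Int) 0) (a:Int) []) (k:Int) 0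
        = g2 bd a k := by
      have h1 : PySem.List.pyGetD (PySem.List.pyGetD (pvAdd2 P.1 (a:Int) (k:Int) 0) (a:Int) []) (k:Int) 0
          = g2 (pvAdd2 P.1 (a:Int) (k:Int) 0) a k := by simp [g2]
      rw [h1, hg' a k]
    refine ⟨by rw [len_pvAdd2, ihl], fun k' => by rw [rowlen_pvAdd2, ihrl k'], hg', ?_⟩
    rw [hread, ihc]
    conv_rhs => rw [Finset.sum_range_succ]
    split_ifs <;> ring

lemma outerCnt0 (m : List (List Int)) (hm : ∀ i j : Nat, g2 m i j = 0) :
    ∀ n : Nat, ∀ (bd : List (List Int)) (ans : Int), n ≤ bd.length →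
      ((PySem.List.pyRange 0 (n:Int) 1).foldl (fun st i =>
          (PySem.List.pyRange 0 ((PySem.List.pyGetD st.1 i []).length : Int) 1).foldl (pvCntIn m i) st) (bd, ans)).1.length = bd.length ∧
      (∀ k : Nat, (((PySem.List.pyRange 0 (n:Int) 1).foldl (fun st i =>
          (PySem.List.pyRange 0 ((PySem.List.pyGetD st.1 i []).length : Int) 1).foldl (pvCntIn m i) st) (bd, ans)).1.getD k []).length
        = (bd.getD k []).length) ∧
      (∀ i j : Nat, g2 ((PySem.List.pyRange 0 (n:Int) 1).foldl (fun st i =>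
          (PySem.List.pyRange 0 ((PySem.List.pyGetD st.1 i []).length : Int) 1).foldl (pvCntIn m i) st) (bd, ans)).1 i j = g2 bd i j) ∧
      ((PySem.List.pyRange 0 (n:Int) 1).foldl (fun st i =>
          (PySem.List.pyRange 0 ((PySem.List.pyGetD st.1 i []).length : Int) 1).foldl (pvCntIn m i) st) (bd, ans)).2
        = ans + ∑ i ∈ Finset.range n, ∑ j ∈ Finset.range (bd.getD i []).length, (if 0 < g2 bd i j then 1 else 0) := by
  intro n
  induction n with
  | zero =>
    intro bd ans _
    rw [show ((0:Nat):Int) = (0:Int) by simp, PySem.List.pyRange_one_eq_nil le_rfl, List.foldl_nil]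
    exact ⟨rfl, fun k => rfl, fun i j => rfl, by simp⟩
  | succ k ihk =>
    intro bd ans hk
    rw [show ((k+1:Nat):Int) = (k:Int)+1 by push_cast; ring,
        PySem.List.pyRange_one_succ_right (Int.natCast_nonneg k)]
    simp only [List.foldl_append, List.foldl_cons, List.foldl_nil]
    obtain ⟨ihl, ihrl, ihg, ihc⟩ := ihk bd ans (by omega)
    set P := (PySem.List.pyRange 0 (k:Int) 1).foldl (fun st i =>
        (PySem.List.pyRange 0 ((PySem.List.pyGetD st.1 i []).length : Int) 1).foldl (pvCntIn m i) st) (bd, ans) with hP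
    have hb : ((PySem.List.pyGetD P.1 (k:Int) []).length : Int) = (((bd.getD k []).length : Nat) : Int) := by
      have h1 : PySem.List.pyGetD P.1 (k:Int) [] = P.1.getD k [] := by simp
      rw [h1, ihrl k]
    rw [hb]
    obtain ⟨il, irl, ig, ic⟩ := innerCnt0 m hm k ((bd.getD k []).length) P.1 P.2
      (by rw [ihl]; omega) (by rw [ihrl k])
    rw [Prod.mk.eta] at il irl ig ic
    refine ⟨by rw [il, ihl], fun k' => by rw [irl k', ihrl k'], fun i j => by rw [ig i j, ihg i j], ?_⟩
    rw [ic, ihc]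
    conv_rhs => rw [Finset.sum_range_succ]
    have hcongr : ∑ j ∈ Finset.range (bd.getD k []).length, (if 0 < g2 P.1 k j then (1:Int) else 0)
        = ∑ j ∈ Finset.range (bd.getD k []).length, (if 0 < g2 bd k j then (1:Int) else 0) := by
      refine Finset.sum_congr rfl (fun j hj => ?_)
      rw [ihg k j]
    rw [hcongr]
    ring

lemma A_val0 (board : List (List Int)) :
    solution board []
      = ∑ i ∈ Finset.range board.length, ∑ j ∈ Finset.range (board.getD i []).length,
          (if 0 < g2 board i j then 1 else 0) := by
  have h00 : PySem.List.pyGetD board 0 [] = board.headD [] := by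
    rw [PySem.List.pyGetD_zero]; cases board <;> rfl
  simp only [solution, h00, List.foldl_nil]
  set R := board.length with hR
  set C := (board.headD []).length with hC
  set ps0 := List.replicate (R + 1) (List.replicate (C + 1) (0:Int)) with hps0
  have e1 : ((ps0.length : Int)) - 1 = (R:Int) := by
    rw [hps0]; simp only [List.length_replicate]; push_cast; ring
  rw [e1]
  set ps2 := (PySem.List.pyRange 0 (R:Int) 1).foldl (fun ps i =>
      (PySem.List.pyRange 0 (((PySem.List.pyGetD ps 0 []).length : Int) - 1) 1).foldl (pvRowIn i) ps) ps0 with hps2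
  obtain ⟨hS2, hg2⟩ := passRow R C R le_rfl ps0 (hps0 ▸ Shp_rep R C)
  rw [← hps2] at hS2 hg2
  have e2 : ((PySem.List.pyGetD ps2 0 []).length : Int) - 1 = (C:Int) := by
    rw [PySem.List.pyGetD_zero, hS2.2 0 (by omega)]; push_cast; ring
  rw [e2]
  set ps3 := (PySem.List.pyRange 0 (C:Int) 1).foldl (fun ps j =>
      (PySem.List.pyRange 0 ((ps.length : Int) - 1) 1).foldl (pvColIn j) ps) ps2 with hps3
  obtain ⟨hS3, hg3⟩ := passCol R C C le_rfl ps2 hS2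
  rw [← hps3] at hS3 hg3
  have hz0 : ∀ t u : Nat, g2 ps0 t u = 0 := by
    intro t u; rw [hps0]; exact g2_rep R C t u
  have hz2 : ∀ i j : Nat, j ≤ C → g2 ps2 i j = 0 := by
    intro i j hj
    rw [hg2 i j hj]
    split_ifs with h
    · exact Finset.sum_eq_zero (fun u _ => hz0 i u)
    · exact hz0 i j
  have hz : ∀ i j : Nat, g2 ps3 i j = 0 := by
    intro i j
    by_cases hiR : i ≤ R
    · by_cases hjC : j ≤ C
      · rw [hg3 i j hiR]
        split_ifs with h
        · exact Finset.sum_eq_zero (fun t _ => hz2 t j hjC)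
        · exact hz2 i j hjC
      · unfold g2
        exact List.getD_eq_default (ps3.getD i []) 0 (by rw [hS3.2 i (by omega)]; omega)
    · unfold g2
      have hrow : ps3.getD i [] = [] := List.getD_eq_default ps3 [] (by rw [hS3.1]; omega)
      rw [hrow]
      simp [List.getD]
  obtain ⟨-, -, -, hcnt⟩ := outerCnt0 ps3 hz R board 0 le_rfl
  rw [hcnt, zero_add]

lemma B_val0 (board : List (List Int)) :
    solution_alt board []
      = ∑ i ∈ Finset.range board.length, ∑ j ∈ Finset.range (board.getD i []).length,
          (if 0 < g2 board i j then 1 else 0) := by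
  simp only [solution_alt, List.foldl_nil]
  rw [totalcount _ 0, zero_add, sum_map_getD' _ _ []]
  refine Finset.sum_congr rfl (fun i hi => ?_)
  rw [sum_map_getD _ _ 0]
  exact Finset.sum_congr rfl (fun j hj => rfl)

-- ===== VERDICT (by name: the statement is the Claim_ definition above) =====
theorem solution_spec : Claim_equal_solution := by
  intro board skill _ hpre
  obtain ⟨hne, hcase⟩ := hpre
  unfold Spec_solution
  rcases hcase with ⟨rfl, -⟩ | ⟨hrect, hsk'⟩
  · rw [A_val0 board, B_val0 board]
  · have hS : Shp board board.length (board.headD []).length := by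
      refine ⟨rfl, fun i hi => ?_⟩
      rw [List.getD_eq_getElem board [] hi]
      exact hrect board[i] (List.getElem_mem hi)
    have hsk : ∀ s ∈ skill, OkS s board.length (board.headD []).length := fun s hs => hsk' s hs
    rw [A_val board skill hS hsk, B_val board skill hS hsk]
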